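-- pv_equiv track=rewrite | github.com/Aabhishek29/DAA | test1.py | getRectangleCount
-- ===== SOURCE A (Python) =====
-- def getRectangleCount(coordinate):
--     n = len(coordinate)
--     y_count = dict()
--     ans = 0
--     for i in range(n):
--         x, y = coordinate[i]
--         for j in range(n):
--             dx = coordinate[j][0]
--             dy = coordinate[j][1]
--             if y < dy and x == dx:
--                 ans += y_count.get((y, dy), 0)
--                 y_count[(y, dy)] = y_count.get((y, dy), 0) + 1
--     return ans
-- ===== SOURCE B (Python) =====
-- def getRectangleCount(coordinate):
--     cols = {}
--     for x, y in coordinate: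
--         cols[x] = cols.get(x, []) + [y]
--     m = {}
--     for ys in cols.values():
--         for a in range(len(ys)):
--             for b in range(len(ys)):
--                 if ys[a] < ys[b]:
--                     key = (ys[a], ys[b])
--                     m[key] = m.get(key, 0) + 1
--     ans = 0
--     for v in m.values():
--         ans += v * (v - 1) // 2
--     return ans
-- ===== Notes on version B (the rewrite author's own statement) =====
-- stated objective: faster
-- what changed: Instead of A's O(n^2) double loop over all point pairs with an incremental seen-counter, B groups points by x-column in one pass, counts each vertical segment (y1,y2) only within its column, and returns sum of m*(m-1)//2 over the segment counter.
import Mathlib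
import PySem

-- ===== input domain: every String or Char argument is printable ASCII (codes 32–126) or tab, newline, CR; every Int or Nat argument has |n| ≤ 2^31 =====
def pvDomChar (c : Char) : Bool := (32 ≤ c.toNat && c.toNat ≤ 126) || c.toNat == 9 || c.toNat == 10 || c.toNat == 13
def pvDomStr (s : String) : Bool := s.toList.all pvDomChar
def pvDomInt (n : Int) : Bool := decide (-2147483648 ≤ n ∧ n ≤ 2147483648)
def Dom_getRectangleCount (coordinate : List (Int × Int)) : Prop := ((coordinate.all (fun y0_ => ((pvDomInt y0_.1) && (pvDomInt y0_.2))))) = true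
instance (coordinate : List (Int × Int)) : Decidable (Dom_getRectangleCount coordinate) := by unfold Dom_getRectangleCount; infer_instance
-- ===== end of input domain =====

-- B replaces A's O(n^2) all-pairs scan with a group-by-column pass and a per-segment counter, summing m*(m-1)//2 (objective: faster).

-- ===== PORT A =====
def getRectangleCount (coordinate : List (Int × Int)) : Int :=
  let n : Int := (coordinate.length : Int)
  let r := (PySem.List.pyRange 0 n 1).foldl (fun (s : PySem.Dict (Int × Int) Int × Int) i =>
      let p := PySem.List.pyGetD coordinate i (0, 0)
      (PySem.List.pyRange 0 n 1).foldl (fun s j =>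
        let q := PySem.List.pyGetD coordinate j (0, 0)
        if p.2 < q.2 ∧ p.1 = q.1 then
          (s.1.insert (p.2, q.2) (s.1.getD (p.2, q.2) 0 + 1), s.2 + s.1.getD (p.2, q.2) 0)
        else s) s)
    (PySem.Dict.empty, 0)
  r.2

-- ===== PORT B =====
def getRectangleCount_alt (coordinate : List (Int × Int)) : Int :=
  let cols := coordinate.foldl (fun (d : PySem.Dict Int (List Int)) p =>
      d.modify p.1 [] (fun ys => ys ++ [p.2])) PySem.Dict.empty
  let m := cols.values.foldl (fun (m : PySem.Dict (Int × Int) Int) ys =>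
      (PySem.List.pyRange 0 (ys.length : Int) 1).foldl (fun m a =>
        (PySem.List.pyRange 0 (ys.length : Int) 1).foldl (fun m b =>
          if PySem.List.pyGetD ys a 0 < PySem.List.pyGetD ys b 0 then
            m.insert (PySem.List.pyGetD ys a 0, PySem.List.pyGetD ys b 0)
              (m.getD (PySem.List.pyGetD ys a 0, PySem.List.pyGetD ys b 0) 0 + 1)
          else m) m) m)
    PySem.Dict.empty
  m.values.foldl (fun ans v => ans + PySem.Int.floordiv (v * (v - 1)) 2) 0

-- ===== PRECONDITION & SPEC =====
def Spec_getRectangleCount (coordinate : List (Int × Int)) (out : Int) : Prop := out = getRectangleCount_alt coordinate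
instance (coordinate : List (Int × Int)) (out : Int) : Decidable (Spec_getRectangleCount coordinate out) := by unfold Spec_getRectangleCount; infer_instance

-- ===== CLAIM (what is proved, stated in full; the proofs are below) =====
def Claim_equal_getRectangleCount : Prop := ∀ (coordinate : List (Int × Int)), Dom_getRectangleCount coordinate → Spec_getRectangleCount coordinate (getRectangleCount coordinate)

-- ===== LEMMAS AND PROOFS =====

/-- The segment keys A's inner loop over `l` produces for an outer point `p`. -/
def pvInner (l : List (Int × Int)) (p : Int × Int) : List (Int × Int) :=
  l.filterMap (fun q => if p.2 < q.2 ∧ p.1 = q.1 then some (p.2, q.2) else none)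

/-- All segment keys in A's enumeration order. -/
def pvKeysA (l : List (Int × Int)) : List (Int × Int) := l.flatMap (pvInner l)

/-- The segment keys B produces from one column's y-list. -/
def pvColKeys (ys : List Int) : List (Int × Int) :=
  ys.flatMap (fun u => ys.filterMap (fun v => if u < v then some (u, v) else none))

/-- The y-values of column `x`, in input order. -/
def pvYs (l : List (Int × Int)) (x : Int) : List Int :=
  (l.filter (fun p => p.1 == x)).map (fun p => p.2)

/-- All segment keys in B's enumeration order. -/
def pvKeysB (l : List (Int × Int)) : List (Int × Int) :=
  (PySem.Set.ofList (l.map (fun p => p.1))).flatMap (fun x => pvColKeys (pvYs l x))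

def pvC2 (m : Int) : Int := PySem.Int.floordiv (m * (m - 1)) 2

/-- Number of (earlier, later) pairs of equal elements of `K`. -/
def pvEq : List (Int × Int) → Int
  | [] => 0
  | k :: K => K.count k + pvEq K

/-- What A's running (seen-counter, answer) fold adds to the answer, processing `K` from dict `d`. -/
def pvAns (d : PySem.Dict (Int × Int) Int) : List (Int × Int) → Int
  | [] => 0
  | k :: K => d.getD k 0 + pvAns (d.insert k (d.getD k 0 + 1)) K

theorem pv_foldl_if_filterMap {α β σ : Type} (c : α → Prop) [DecidablePred c] (k : α → β)
    (f : σ → β → σ) (l : List α) (s : σ) :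
    l.foldl (fun s x => if c x then f s (k x) else s) s
      = (l.filterMap (fun x => if c x then some (k x) else none)).foldl f s := by
  induction l generalizing s with
  | nil => rfl
  | cons a l ih => by_cases h : c a <;> simp [h, ih]

theorem pv_pairfold (K : List (Int × Int)) (d : PySem.Dict (Int × Int) Int) (a : Int) :
    K.foldl (fun s k => (s.1.insert k (s.1.getD k 0 + 1), s.2 + s.1.getD k 0)) (d, a)
      = (K.foldl (fun d k => d.insert k (d.getD k 0 + 1)) d, a + pvAns d K) := by
  induction K generalizing d a with
  | nil => simp [pvAns]
  | cons k K ih => simp [pvAns, ih]; ring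

theorem pv_sum_getD_insert (K : List (Int × Int)) (d : PySem.Dict (Int × Int) Int) (k : Int × Int) :
    (K.map (fun x => (d.insert k (d.getD k 0 + 1)).getD x 0)).sum
      = (K.map (fun x => d.getD x 0)).sum + K.count k := by
  induction K with
  | nil => simp
  | cons x K ih =>
    simp only [List.map_cons, List.sum_cons, List.count_cons]
    rw [ih]
    by_cases h : x = k <;> simp [h, PySem.Dict.getD_insert] <;> ring

theorem pv_ans_eq (K : List (Int × Int)) (d : PySem.Dict (Int × Int) Int) :
    pvAns d K = pvEq K + (K.map (fun x => d.getD x 0)).sum := by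
  induction K generalizing d with
  | nil => simp [pvAns, pvEq]
  | cons k K ih => simp [pvAns, pvEq, ih, pv_sum_getD_insert]; ring

theorem pv_c2_succ (m : Int) : pvC2 (m + 1) = pvC2 m + m := by
  obtain ⟨c, hc⟩ := Int.even_mul_succ_self (m - 1)
  have h1 : m * (m - 1) = 2 * c := by linear_combination hc
  have h2 : (m + 1) * (m + 1 - 1) = 2 * (c + m) := by linear_combination hc
  unfold pvC2 PySem.Int.floordiv
  rw [h1, h2, Int.mul_fdiv_cancel_left _ (by norm_num), Int.mul_fdiv_cancel_left _ (by norm_num)]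

theorem pv_sumc2_eq (K : List (Int × Int)) :
    ((PySem.Set.ofList K).map (fun k => pvC2 (K.count k))).sum = pvEq K := by
  induction K with
  | nil => simp [pvEq, PySem.Set.ofList]
  | cons k K ih =>
    rw [PySem.Set.ofList_cons]
    have hnd := PySem.Set.nodup_ofList K
    have hdis : (PySem.Set.ofList K).discard k = (PySem.Set.ofList K).erase k := by
      rw [hnd.erase_eq_filter]
      rfl
    by_cases h : k ∈ K
    · have hmem : k ∈ PySem.Set.ofList K := (PySem.Set.mem_ofList K k).2 h
      have hperm := List.perm_cons_erase hmem
      have hsum : ((PySem.Set.ofList K).map (fun x => pvC2 (K.count x))).sum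
          = pvC2 (K.count k) + (((PySem.Set.ofList K).erase k).map (fun x => pvC2 (K.count x))).sum := by
        have := (hperm.map (fun x => pvC2 (K.count x))).sum_eq
        simpa using this
      have hcongr : (((PySem.Set.ofList K).erase k).map (fun x => pvC2 ((k :: K).count x)))
          = (((PySem.Set.ofList K).erase k).map (fun x => pvC2 (K.count x))) := by
        apply List.map_congr_left
        intro x hx
        have hxk : x ≠ k := ((hnd.mem_erase_iff).1 hx).1
        simp [Ne.symm hxk]
      simp only [List.map_cons, List.sum_cons, hdis, hcongr, pvEq]
      rw [ih] at hsum
      rw [List.count_cons_self]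
      push_cast
      rw [pv_c2_succ]
      linarith [hsum]
    · have hcnt : K.count k = 0 := List.count_eq_zero.2 h
      have hdis2 : (PySem.Set.ofList K).discard k = PySem.Set.ofList K := by
        rw [hdis, List.erase_of_not_mem (by simpa [PySem.Set.mem_ofList] using h)]
      have hcongr : ((PySem.Set.ofList K).map (fun x => pvC2 ((k :: K).count x)))
          = ((PySem.Set.ofList K).map (fun x => pvC2 (K.count x))) := by
        apply List.map_congr_left
        intro x hx
        have hxk : x ≠ k := fun he => h (he ▸ (PySem.Set.mem_ofList K x).1 hx)
        simp [Ne.symm hxk]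
      have h1 : pvC2 1 = 0 := by decide
      simp only [List.map_cons, List.sum_cons, hdis2, hcongr, pvEq, ih, List.count_cons_self, hcnt]
      norm_num [h1]

theorem pv_eq_perm {K K' : List (Int × Int)} (h : K.Perm K') : pvEq K = pvEq K' := by
  induction h with
  | nil => rfl
  | cons a h ih => simp [pvEq, ih, h.count_eq]
  | swap a b K =>
    simp [pvEq, List.count_cons]
    rcases eq_or_ne a b with h | h
    · simp [h]
    · simp [h, Ne.symm h]
      ring
  | trans h1 h2 ih1 ih2 => exact ih1.trans ih2

theorem pv_sum_ite_mem {α : Type} [DecidableEq α] (S : List α) (hS : S.Nodup) (a : α) (c : Nat) :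
    (S.map (fun x => if a = x then c else 0)).sum = if a ∈ S then c else 0 := by
  induction S with
  | nil => simp
  | cons x S ih =>
    simp only [List.nodup_cons] at hS
    simp only [List.map_cons, List.sum_cons, ih hS.2, List.mem_cons]
    by_cases h : a = x
    · subst h
      simp [hS.1]
    · simp [h]

theorem pv_fiber_perm (l : List (Int × Int)) :
    l.Perm ((PySem.Set.ofList (l.map (fun p => p.1))).flatMap
      (fun x => l.filter (fun p => p.1 == x))) := by
  rw [List.perm_iff_count]
  intro p
  rw [List.count_flatMap]
  have hmap : (List.map (List.count p ∘ fun x => List.filter (fun q => q.1 == x) l)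
        (PySem.Set.ofList (l.map (fun q => q.1))))
      = (PySem.Set.ofList (l.map (fun q => q.1))).map
          (fun x => if p.1 = x then List.count p l else 0) := by
    apply List.map_congr_left
    intro x _
    by_cases h : p.1 = x
    · simp only [Function.comp_apply, if_pos h]
      exact List.count_filter (by simp [h])
    · simp only [Function.comp_apply, if_neg h]
      rw [List.count_eq_zero]
      intro hm
      exact h (by simpa using (List.mem_filter.1 hm).2)
  rw [hmap, pv_sum_ite_mem _ (PySem.Set.nodup_ofList _)]
  by_cases hm : p.1 ∈ PySem.Set.ofList (l.map (fun q => q.1))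
  · rw [if_pos hm]
  · rw [if_neg hm, List.count_eq_zero]
    intro hpl
    exact hm ((PySem.Set.mem_ofList _ _).2 (List.mem_map_of_mem hpl))

theorem pv_inner_eq (l : List (Int × Int)) (p : Int × Int) :
    pvInner l p = (pvYs l p.1).filterMap (fun v => if p.2 < v then some (p.2, v) else none) := by
  unfold pvInner pvYs
  rw [List.filterMap_map, List.filterMap_filter]
  apply List.filterMap_congr
  intro q _
  simp only [Function.comp_apply, beq_iff_eq]
  by_cases h1 : p.1 = q.1
  · by_cases h2 : p.2 < q.2
    · rw [if_pos ⟨h2, h1⟩, if_pos h1.symm, if_pos h2]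
    · rw [if_neg (fun hc => h2 hc.1), if_pos h1.symm, if_neg h2]
  · rw [if_neg (fun hc => h1 hc.2), if_neg (fun hc => h1 hc.symm)]

theorem pv_keys_perm (l : List (Int × Int)) : (pvKeysA l).Perm (pvKeysB l) := by
  have h1 : (pvKeysA l).Perm
      (((PySem.Set.ofList (l.map (fun p => p.1))).flatMap
        (fun x => l.filter (fun p => p.1 == x))).flatMap (pvInner l)) :=
    (pv_fiber_perm l).flatMap (fun a _ => List.Perm.refl _)
  rw [List.flatMap_assoc] at h1
  have h2 : ∀ x : Int, (l.filter (fun p => p.1 == x)).flatMap (pvInner l)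
      = pvColKeys (pvYs l x) := by
    intro x
    have hcongr : (l.filter (fun p => p.1 == x)).flatMap (pvInner l)
        = (l.filter (fun p => p.1 == x)).flatMap
            (fun p => (pvYs l x).filterMap (fun v => if p.2 < v then some (p.2, v) else none)) := by
      rw [List.flatMap_def, List.flatMap_def]
      congr 1
      apply List.map_congr_left
      intro p hp
      have hx : p.1 = x := by simpa using (List.mem_filter.1 hp).2
      rw [pv_inner_eq, hx]
    rw [hcongr]
    show _ = (pvYs l x).flatMap _
    unfold pvYs
    rw [List.flatMap_map]
  have h3 : ((PySem.Set.ofList (l.map (fun p => p.1))).flatMap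
        (fun x => (l.filter (fun p => p.1 == x)).flatMap (pvInner l)))
      = pvKeysB l := by
    unfold pvKeysB
    rw [List.flatMap_def, List.flatMap_def]
    congr 1
    exact List.map_congr_left (fun x _ => h2 x)
  rw [h3] at h1
  exact h1

theorem pv_foldl_add (l : List Int) (a : Int) :
    l.foldl (fun a v => a + pvC2 v) a = a + (l.map pvC2).sum := by
  induction l generalizing a with
  | nil => simp
  | cons v l ih => simp [ih]; ring

theorem pv_A_eq (l : List (Int × Int)) : getRectangleCount l = pvEq (pvKeysA l) := by
  unfold getRectangleCount
  simp only []
  rw [PySem.List.foldl_pyRange_zero_pyGetD' l ((0:Int), (0:Int))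
    (fun (s : PySem.Dict (Int × Int) Int × Int) (p : Int × Int) =>
      (PySem.List.pyRange 0 (l.length : Int) 1).foldl (fun s j =>
        let q := PySem.List.pyGetD l j (0, 0)
        if p.2 < q.2 ∧ p.1 = q.1 then
          (s.1.insert (p.2, q.2) (s.1.getD (p.2, q.2) 0 + 1), s.2 + s.1.getD (p.2, q.2) 0)
        else s) s)
    (PySem.Dict.empty, 0)]
  have hin : (fun (s : PySem.Dict (Int × Int) Int × Int) (p : Int × Int) =>
      (PySem.List.pyRange 0 (l.length : Int) 1).foldl (fun s j =>
        let q := PySem.List.pyGetD l j (0, 0)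
        if p.2 < q.2 ∧ p.1 = q.1 then
          (s.1.insert (p.2, q.2) (s.1.getD (p.2, q.2) 0 + 1), s.2 + s.1.getD (p.2, q.2) 0)
        else s) s)
      = (fun s p => (pvInner l p).foldl
          (fun s k => (s.1.insert k (s.1.getD k 0 + 1), s.2 + s.1.getD k 0)) s) := by
    funext s p
    rw [PySem.List.foldl_pyRange_zero_pyGetD' l ((0:Int), (0:Int))
      (fun s (q : Int × Int) =>
        if p.2 < q.2 ∧ p.1 = q.1 then
          (s.1.insert (p.2, q.2) (s.1.getD (p.2, q.2) 0 + 1), s.2 + s.1.getD (p.2, q.2) 0)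
        else s) s]
    exact pv_foldl_if_filterMap (fun q : Int × Int => p.2 < q.2 ∧ p.1 = q.1)
      (fun q : Int × Int => (p.2, q.2))
      (fun s k => (s.1.insert k (s.1.getD k 0 + 1), s.2 + s.1.getD k 0)) l s
  rw [hin, ← List.foldl_flatMap]
  show ((pvKeysA l).foldl _ (PySem.Dict.empty, 0)).2 = _
  rw [pv_pairfold, pv_ans_eq]
  simp


theorem pv_B_eq (l : List (Int × Int)) : getRectangleCount_alt l = pvEq (pvKeysB l) := by
  unfold getRectangleCount_alt
  simp only []
  set cols := l.foldl (fun (d : PySem.Dict Int (List Int)) p =>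
      d.modify p.1 [] (fun ys => ys ++ [p.2])) PySem.Dict.empty with hcols
  have hkeys : cols.keys = PySem.Set.ofList (l.map (fun p => p.1)) := by
    rw [hcols, PySem.Dict.keys_foldl_modify_key l (fun p => p.1) [] (fun _ p => fun ys => ys ++ [p.2])]
    simp [PySem.Set.update_nil_left]
  have hnodup : cols.keys.Nodup := by
    rw [hkeys]; exact PySem.Set.nodup_ofList _
  have hgetD : ∀ x : Int, cols.getD x [] = pvYs l x := by
    intro x
    rw [hcols, PySem.Dict.getD_foldl_modify_append l PySem.Dict.empty x]
    simp [pvYs]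
  have hvals : cols.values = (PySem.Set.ofList (l.map (fun p => p.1))).map (pvYs l) := by
    rw [PySem.Dict.values_eq_map_keys cols hnodup [], hkeys]
    exact List.map_congr_left (fun x _ => hgetD x)
  have hbig : ∀ (ys : List Int) (m : PySem.Dict (Int × Int) Int),
      (PySem.List.pyRange 0 (ys.length : Int) 1).foldl (fun m a =>
        (PySem.List.pyRange 0 (ys.length : Int) 1).foldl (fun m b =>
          if PySem.List.pyGetD ys a 0 < PySem.List.pyGetD ys b 0 then
            m.insert (PySem.List.pyGetD ys a 0, PySem.List.pyGetD ys b 0)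
              (m.getD (PySem.List.pyGetD ys a 0, PySem.List.pyGetD ys b 0) 0 + 1)
          else m) m) m
      = (pvColKeys ys).foldl (fun m k => m.insert k (m.getD k 0 + 1)) m := by
    intro ys m
    rw [PySem.List.foldl_pyRange_zero_pyGetD' ys 0
      (fun m (u : Int) =>
        (PySem.List.pyRange 0 (ys.length : Int) 1).foldl (fun m b =>
          if u < PySem.List.pyGetD ys b 0 then
            m.insert (u, PySem.List.pyGetD ys b 0)
              (m.getD (u, PySem.List.pyGetD ys b 0) 0 + 1)
          else m) m) m]
    have hin : (fun (m : PySem.Dict (Int × Int) Int) (u : Int) =>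
        (PySem.List.pyRange 0 (ys.length : Int) 1).foldl (fun m b =>
          if u < PySem.List.pyGetD ys b 0 then
            m.insert (u, PySem.List.pyGetD ys b 0)
              (m.getD (u, PySem.List.pyGetD ys b 0) 0 + 1)
          else m) m)
        = (fun m u => (ys.filterMap (fun v => if u < v then some (u, v) else none)).foldl
            (fun m k => m.insert k (m.getD k 0 + 1)) m) := by
      funext m u
      rw [PySem.List.foldl_pyRange_zero_pyGetD' ys 0
        (fun m (v : Int) =>
          if u < v then m.insert (u, v) (m.getD (u, v) 0 + 1) else m) m]
      exact pv_foldl_if_filterMap (fun v : Int => u < v) (fun v : Int => (u, v))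
        (fun m k => m.insert k (m.getD k 0 + 1)) ys m
    rw [hin, ← List.foldl_flatMap]
    rfl
  have hm : cols.values.foldl (fun (m : PySem.Dict (Int × Int) Int) ys =>
      (PySem.List.pyRange 0 (ys.length : Int) 1).foldl (fun m a =>
        (PySem.List.pyRange 0 (ys.length : Int) 1).foldl (fun m b =>
          if PySem.List.pyGetD ys a 0 < PySem.List.pyGetD ys b 0 then
            m.insert (PySem.List.pyGetD ys a 0, PySem.List.pyGetD ys b 0)
              (m.getD (PySem.List.pyGetD ys a 0, PySem.List.pyGetD ys b 0) 0 + 1)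
          else m) m) m) PySem.Dict.empty
      = PySem.Dict.counter (pvKeysB l) := by
    rw [hvals, List.foldl_map]
    have : (fun (m : PySem.Dict (Int × Int) Int) (x : Int) =>
        (PySem.List.pyRange 0 ((pvYs l x).length : Int) 1).foldl (fun m a =>
          (PySem.List.pyRange 0 ((pvYs l x).length : Int) 1).foldl (fun m b =>
            if PySem.List.pyGetD (pvYs l x) a 0 < PySem.List.pyGetD (pvYs l x) b 0 then
              m.insert (PySem.List.pyGetD (pvYs l x) a 0, PySem.List.pyGetD (pvYs l x) b 0)
                (m.getD (PySem.List.pyGetD (pvYs l x) a 0, PySem.List.pyGetD (pvYs l x) b 0) 0 + 1)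
            else m) m) m)
        = (fun m x => (pvColKeys (pvYs l x)).foldl (fun m k => m.insert k (m.getD k 0 + 1)) m) := by
      funext m x
      exact hbig (pvYs l x) m
    rw [this, ← List.foldl_flatMap]
    rw [PySem.Dict.foldl_insert_getD_add_one_eq_counter]
    rfl
  rw [hm]
  have hc2 : (fun (ans v : Int) => ans + PySem.Int.floordiv (v * (v - 1)) 2)
      = fun a v => a + pvC2 v := rfl
  rw [hc2, pv_foldl_add]
  have hv : (PySem.Dict.counter (pvKeysB l)).values
      = (PySem.Set.ofList (pvKeysB l)).map (fun k => ((pvKeysB l).count k : Int)) := by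
    show ((PySem.Dict.counter (pvKeysB l)).items).map (fun p => p.2) = _
    rw [PySem.Dict.items_counter, List.map_map]
    rfl
  rw [hv, List.map_map]
  have := pv_sumc2_eq (pvKeysB l)
  simpa using this


-- ===== VERDICT (by name: the statement is the Claim_ definition above) =====
theorem getRectangleCount_spec : Claim_equal_getRectangleCount := by
  intro l _
  unfold Spec_getRectangleCount
  rw [pv_A_eq, pv_B_eq]
  exact pv_eq_perm (pv_keys_perm l)
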